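-- pv_equiv track=rewrite | github.com/Valium-K/algorithm-study | dev.valium.algorithm/main.py | get_swiped_game_map
-- ===== SOURCE A (Python) =====
-- import copy
--
-- def get_swiped_game_map(game_map, swipe):
--     temp_map = copy.deepcopy(game_map)
--
--     if swipe == "LEFT":
--         for k in range(len(temp_map)):
--             for i in range(len(temp_map) - 1):
--                 for j in range(i + 1, len(temp_map[0])):
--                     if temp_map[k][i] == temp_map[k][j] or temp_map[k][i] == 0:
--                         temp_map[k][i] += temp_map[k][j]
--                         temp_map[k][j] = 0
--                     else:
--                         continue
--
--     elif swipe == "RIGHT":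
--         for k in range(len(temp_map)):
--             for i in range(len(temp_map) - 1, 0, -1):
--                 for j in range(i - 1, -1, -1):
--                     if temp_map[k][i] == temp_map[k][j] or temp_map[k][i] == 0:
--                         temp_map[k][i] += temp_map[k][j]
--                         temp_map[k][j] = 0
--                     else:
--                         continue
--
--     elif swipe == "UP":
--         for k in range(len(temp_map)):
--             for i in range(0, len(temp_map) - 1):
--                 for j in range(i + 1, len(temp_map[0])):
--                     if temp_map[i][k] == temp_map[j][k] or temp_map[i][k] == 0:
--                         temp_map[i][k] += temp_map[j][k]
--                         temp_map[j][k] = 0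
--                     else:
--                         break
--
--     else:
--         for k in range(len(temp_map)):
--             for i in range(len(temp_map)-1, 0, -1):
--                 for j in range(i - 1, -1, -1):
--                     if temp_map[i][k] == temp_map[j][k] or temp_map[i][k] == 0:
--                         temp_map[i][k] += temp_map[j][k]
--                         temp_map[j][k] = 0
--                     else:
--                         break
--
--     return temp_map
-- ===== SOURCE B (Python) =====
-- # B: per-line functional transforms (continue-style and break-style absorption
-- # scans) applied to rows / reversed rows / zip-transposed columns, instead of
-- # A's four triple-nested index loops over a deep-copied matrix.
--
-- def _absorb_all(val, tail):
--     # continue-style scan (LEFT/RIGHT): absorb every later cell equal to the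
--     # running value (or anything while the value is 0); keep the rest in place.
--     out = []
--     for x in tail:
--         if val == 0 or x == val:
--             val += x
--             out.append(0)
--         else:
--             out.append(x)
--     return val, out
--
-- def _absorb_break(val, tail):
--     # break-style scan (UP/DOWN): absorb consecutive cells while they equal the
--     # running value (or while it is 0); stop at the first mismatch.
--     out = []
--     i = 0
--     while i < len(tail) and (val == 0 or tail[i] == val):
--         val += tail[i]
--         out.append(0)
--         i += 1
--     return val, out + list(tail[i:])
--
-- def _line_cont(line):
--     out = []
--     rest = list(line)
--     while len(rest) > 1:
--         v, rest = _absorb_all(rest[0], rest[1:])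
--         out.append(v)
--     return out + rest
--
-- def _line_break(line):
--     out = []
--     rest = list(line)
--     while len(rest) > 1:
--         v, rest = _absorb_break(rest[0], rest[1:])
--         out.append(v)
--     return out + rest
--
-- def get_swiped_game_map(game_map, swipe):
--     if swipe == "LEFT":
--         return [_line_cont(r) for r in game_map]
--     elif swipe == "RIGHT":
--         return [_line_cont(r[::-1])[::-1] for r in game_map]
--     elif swipe == "UP":
--         cols = [list(c) for c in zip(*game_map)]
--         return [list(r) for r in zip(*[_line_break(c) for c in cols])]
--     else:
--         cols = [list(c) for c in zip(*game_map)]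
--         return [list(r) for r in zip(*[_line_break(c[::-1])[::-1] for c in cols])]
-- ===== Notes on version B (the rewrite author's own statement) =====
-- stated objective: alternative
-- what changed: B replaces A's four triple-nested index loops mutating a deep-copied matrix by two small functional line transforms (a continue-style and a break-style absorption scan) applied per row, per reversed row, or per zip(*...)-transposed column depending on the swipe direction.
-- outside the precondition, e.g. on get_swiped_game_map([[2, 2]], 'LEFT'): A returns [[2, 2]], B returns [[4, 0]]
import Mathlib
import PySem

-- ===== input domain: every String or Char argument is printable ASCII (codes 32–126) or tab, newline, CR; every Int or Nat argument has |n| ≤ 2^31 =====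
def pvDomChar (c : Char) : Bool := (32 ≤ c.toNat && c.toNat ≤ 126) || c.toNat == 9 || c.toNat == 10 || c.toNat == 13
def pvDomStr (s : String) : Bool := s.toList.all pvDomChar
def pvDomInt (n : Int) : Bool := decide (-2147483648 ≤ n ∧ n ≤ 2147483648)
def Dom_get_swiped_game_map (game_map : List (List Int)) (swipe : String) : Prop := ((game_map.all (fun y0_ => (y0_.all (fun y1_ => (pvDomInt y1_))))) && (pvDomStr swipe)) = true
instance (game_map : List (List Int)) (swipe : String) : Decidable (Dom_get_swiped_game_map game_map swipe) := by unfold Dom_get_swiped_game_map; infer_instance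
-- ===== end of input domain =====

-- B is an alternative implementation: two functional line transforms (continue-style and
-- break-style absorption scans) applied per row / reversed row / transposed column, instead of
-- A's four triple-nested index loops mutating a deep copy. A also mutates nothing observable
-- (it deep-copies its argument), so return-value equivalence is full equivalence.

-- ===== PORT A =====
-- temp_map[k][i] (both indices are ≥ 0 in every loop of A)
def aget (m : List (List Int)) (k i : Int) : Int :=
  PySem.List.pyGetD (PySem.List.pyGetD m k []) i 0

-- temp_map[k][i] = v
def aset (m : List (List Int)) (k i : Int) (v : Int) : List (List Int) :=
  PySem.List.pySetD m k (PySem.List.pySetD (PySem.List.pyGetD m k []) i v)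

-- the inner j-loop of the UP/DOWN branches ('for j in …: if …: … else: break'),
-- which A writes twice with identical bodies; indices are (i,k),(j,k)
def ujloop (m : List (List Int)) (k i : Int) : List Int → List (List Int)
  | [] => m
  | j :: rest =>
    if aget m i k == aget m j k || aget m i k == 0 then
      ujloop (aset (aset m i k (aget m i k + aget m j k)) j k 0) k i rest
    else m

def get_swiped_game_map (game_map : List (List Int)) (swipe : String) : List (List Int) :=
  let temp := game_map
  if swipe == "LEFT" then
    (PySem.List.pyRange 0 (PySem.List.len temp) 1).foldl (fun m k =>
      (PySem.List.pyRange 0 (PySem.List.len m - 1) 1).foldl (fun m i =>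
        (PySem.List.pyRange (i + 1) (PySem.List.len (PySem.List.pyGetD m 0 [])) 1).foldl (fun m j =>
          if aget m k i == aget m k j || aget m k i == 0 then
            aset (aset m k i (aget m k i + aget m k j)) k j 0
          else m) m) m) temp
  else if swipe == "RIGHT" then
    (PySem.List.pyRange 0 (PySem.List.len temp) 1).foldl (fun m k =>
      (PySem.List.pyRange (PySem.List.len m - 1) 0 (-1)).foldl (fun m i =>
        (PySem.List.pyRange (i - 1) (-1) (-1)).foldl (fun m j =>
          if aget m k i == aget m k j || aget m k i == 0 then
            aset (aset m k i (aget m k i + aget m k j)) k j 0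
          else m) m) m) temp
  else if swipe == "UP" then
    (PySem.List.pyRange 0 (PySem.List.len temp) 1).foldl (fun m k =>
      (PySem.List.pyRange 0 (PySem.List.len m - 1) 1).foldl (fun m i =>
        ujloop m k i (PySem.List.pyRange (i + 1) (PySem.List.len (PySem.List.pyGetD m 0 [])) 1)) m) temp
  else
    (PySem.List.pyRange 0 (PySem.List.len temp) 1).foldl (fun m k =>
      (PySem.List.pyRange (PySem.List.len m - 1) 0 (-1)).foldl (fun m i =>
        ujloop m k i (PySem.List.pyRange (i - 1) (-1) (-1))) m) temp

-- ===== PORT B =====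
-- _absorb_all: continue-style scan
def absorbAll : Int → List Int → Int × List Int
  | v, [] => (v, [])
  | v, x :: xs =>
    if v == 0 || x == v then
      ((absorbAll (v + x) xs).1, 0 :: (absorbAll (v + x) xs).2)
    else
      ((absorbAll v xs).1, x :: (absorbAll v xs).2)

-- _absorb_break: break-style scan
def absorbBreak : Int → List Int → Int × List Int
  | v, [] => (v, [])
  | v, x :: xs =>
    if v == 0 || x == v then
      ((absorbBreak (v + x) xs).1, 0 :: (absorbBreak (v + x) xs).2)
    else (v, x :: xs)

-- the scans keep the line length (cited by the termination proofs of the _line loops)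
theorem absorbAll_len (v : Int) (t : List Int) : (absorbAll v t).2.length = t.length := by
  induction t generalizing v with
  | nil => simp [absorbAll]
  | cons x xs ih => simp only [absorbAll]; split <;> simp [ih]

theorem absorbBreak_len (v : Int) (t : List Int) : (absorbBreak v t).2.length = t.length := by
  induction t generalizing v with
  | nil => simp [absorbBreak]
  | cons x xs ih => simp only [absorbBreak]; split <;> simp [ih]

-- _line_cont: 'while len(rest) > 1: v, rest = _absorb_all(rest[0], rest[1:]); out.append(v)'
def lineCont : List Int → List Int
  | [] => []
  | [a] => [a]
  | a :: b :: rest =>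
    (absorbAll a (b :: rest)).1 :: lineCont (absorbAll a (b :: rest)).2
termination_by l => l.length
decreasing_by simp [absorbAll_len]

def lineBreak : List Int → List Int
  | [] => []
  | [a] => [a]
  | a :: b :: rest =>
    (absorbBreak a (b :: rest)).1 :: lineBreak (absorbBreak a (b :: rest)).2
termination_by l => l.length
decreasing_by simp [absorbBreak_len]

-- zip(*m): tuples of the k-th entries, stopping at the shortest row
def zipT : List (List Int) → List (List Int)
  | [] => []
  | r :: rs =>
    if h : (r :: rs).all (fun row => !row.isEmpty) then
      (r :: rs).map (fun row => row.headD 0) :: zipT ((r :: rs).map List.tail)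
    else []
termination_by m => (m.headD []).length
decreasing_by
  simp only [List.all_cons, Bool.and_eq_true, Bool.not_eq_true', List.isEmpty_eq_false_iff] at h
  simp only [List.map_cons, List.headD_cons]
  have hr : 0 < r.length := List.length_pos_iff.mpr h.1
  simp [List.length_tail]
  omega

def get_swiped_game_map_alt (game_map : List (List Int)) (swipe : String) : List (List Int) :=
  if swipe == "LEFT" then game_map.map lineCont
  else if swipe == "RIGHT" then game_map.map (fun r => (lineCont r.reverse).reverse)
  else if swipe == "UP" then zipT ((zipT game_map).map lineBreak)
  else zipT ((zipT game_map).map (fun c => (lineBreak c.reverse).reverse))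

-- ===== PRECONDITION & SPEC =====
-- Pre_ restricts to square grids (each row exactly as long as the number of rows), the game's
-- natural domain: A mixes the row count and the first row's length as loop bounds, so on
-- non-square or ragged maps it raises IndexError or compacts only part of each line as an
-- implementation artefact.
def Pre_get_swiped_game_map (game_map : List (List Int)) (swipe : String) : Prop :=
  ∀ row ∈ game_map, row.length = game_map.length
instance (game_map : List (List Int)) (swipe : String) : Decidable (Pre_get_swiped_game_map game_map swipe) := by
  unfold Pre_get_swiped_game_map; infer_instance

def pvWitness_get_swiped_game_map : List (List Int) × String := ([[2, 2], [0, 2]], "LEFT")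

def Spec_get_swiped_game_map (game_map : List (List Int)) (swipe : String) (out : List (List Int)) : Prop :=
  out = get_swiped_game_map_alt game_map swipe
instance (game_map : List (List Int)) (swipe : String) (out : List (List Int)) : Decidable (Spec_get_swiped_game_map game_map swipe out) := by
  unfold Spec_get_swiped_game_map; infer_instance

-- ===== CLAIM (what is proved, stated in full; the proofs are below) =====
def Claim_equal_get_swiped_game_map : Prop := ∀ (game_map : List (List Int)) (swipe : String), Dom_get_swiped_game_map game_map swipe → Pre_get_swiped_game_map game_map swipe → Spec_get_swiped_game_map game_map swipe (get_swiped_game_map game_map swipe)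

-- ===== LEMMAS AND PROOFS =====

-- ---- proof-side abbreviations (Nat-indexed versions of A's loop bodies) ----
def condN (a : List Int) (i j : Nat) : Bool :=
  a.getD i 0 == a.getD j 0 || a.getD i 0 == 0
def updN (a : List Int) (i j : Nat) : List Int :=
  (a.set i (a.getD i 0 + a.getD j 0)).set j 0
def stepN (a : List Int) (i j : Nat) : List Int :=
  if condN a i j then updN a i j else a
def jB (a : List Int) (i : Nat) : List Nat → List Int
  | [] => a
  | j :: rest => if condN a i j then jB (updN a i j) i rest else a

-- per-line forms of A's four i/j double loops (n = board size)
def rowLN (n : Nat) (a : List Int) : List Int :=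
  (List.range (n - 1)).foldl
    (fun a i => (List.range' (i + 1) (n - 1 - i)).foldl (fun a j => stepN a i j) a) a
def rowRN (n : Nat) (a : List Int) : List Int :=
  ((List.range (n - 1)).map (fun t => n - 1 - t)).foldl
    (fun a i => ((List.range i).map (fun t => i - 1 - t)).foldl (fun a j => stepN a i j) a) a
def rowBN (n : Nat) (a : List Int) : List Int :=
  (List.range (n - 1)).foldl (fun a i => jB a i (List.range' (i + 1) (n - 1 - i))) a
def rowBDN (n : Nat) (a : List Int) : List Int :=
  ((List.range (n - 1)).map (fun t => n - 1 - t)).foldl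
    (fun a i => jB a i ((List.range i).map (fun t => i - 1 - t))) a

def sqm (n : Nat) (m : List (List Int)) : Prop := m.length = n ∧ ∀ r ∈ m, r.length = n
def colGet (k : Nat) (m : List (List Int)) : List Int := m.map (fun r => r.getD k 0)
def colSet (k : Nat) (c : List Int) (m : List (List Int)) : List (List Int) :=
  List.zipWith (fun r v => r.set k v) m c

-- ---- equation lemmas for the recursive scans ----
theorem absorbAll_cons (v x : Int) (xs : List Int) :
    absorbAll v (x :: xs) = if v == 0 || x == v
      then ((absorbAll (v + x) xs).1, 0 :: (absorbAll (v + x) xs).2)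
      else ((absorbAll v xs).1, x :: (absorbAll v xs).2) := by
  rfl

theorem absorbBreak_cons (v x : Int) (xs : List Int) :
    absorbBreak v (x :: xs) = if v == 0 || x == v
      then ((absorbBreak (v + x) xs).1, 0 :: (absorbBreak (v + x) xs).2)
      else (v, x :: xs) := by
  rfl

-- ---- small list facts ----
theorem getD_append_len {α : Type} (pre t : List α) (x : α) (d : α) :
    (pre ++ x :: t).getD pre.length d = x := by
  induction pre with
  | nil => rfl
  | cons a pre ih => simpa using ih
theorem set_append_len {α : Type} (pre t : List α) (x v : α) :
    (pre ++ x :: t).set pre.length v = pre ++ v :: t := by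
  induction pre with
  | nil => rfl
  | cons a pre ih => simpa using ih
theorem reverse_set {α : Type} (l : List α) (i : Nat) (a : α) (h : i < l.length) :
    (l.set i a).reverse = l.reverse.set (l.length - 1 - i) a := by
  apply List.ext_getElem (by simp)
  intro p hp _
  simp only [List.length_reverse, List.length_set] at hp
  have h1 : l.length - 1 - p < l.length := by omega
  simp only [List.getElem_reverse, List.length_set, List.getElem_set]
  split_ifs with h2 h3 h4 <;> first | rfl | omega
theorem getD_reverse (a : List Int) (i : Nat) (h : i < a.length) :
    a.reverse.getD (a.length - 1 - i) 0 = a.getD i 0 := by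
  rw [List.getD_eq_getElem _ _ (by simp; omega), List.getD_eq_getElem _ _ h]
  have h2 : a.length - 1 - (a.length - 1 - i) = i := by omega
  simp [List.getElem_reverse, h2]
theorem range'_shift (s l : Nat) : List.range' (s + 1) l = (List.range' s l).map (· + 1) := by
  simp only [List.range'_eq_map_range, List.map_map]
  apply List.map_congr_left
  intro x _
  simp; omega
theorem map_getD_range {α : Type} (d : α) (l : List α) :
    (List.range l.length).map (fun j => l.getD j d) = l := by
  apply List.ext_getElem (by simp)
  intro p hp _
  simp only [List.getElem_map, List.getElem_range]
  exact List.getD_eq_getElem l d (by simpa using hp)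

-- ---- lengths ----
theorem updN_len (a : List Int) (i j : Nat) : (updN a i j).length = a.length := by
  simp [updN]
theorem stepN_len (a : List Int) (i j : Nat) : (stepN a i j).length = a.length := by
  unfold stepN; split <;> simp [updN_len]
theorem jC_len (js : List Nat) (i : Nat) (a : List Int) :
    (js.foldl (fun a j => stepN a i j) a).length = a.length := by
  induction js generalizing a with
  | nil => rfl
  | cons j js ih => simp only [List.foldl_cons]; rw [ih, stepN_len]
theorem jB_len (js : List Nat) (i : Nat) (a : List Int) : (jB a i js).length = a.length := by
  induction js generalizing a with
  | nil => rfl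
  | cons j js ih =>
    unfold jB; split
    · rw [ih, updN_len]
    · rfl

theorem foldl_len {γ : Type} (l : List γ) (f : List Int → γ → List Int)
    (h : ∀ a x, x ∈ l → (f a x).length = a.length) :
    ∀ a, (l.foldl f a).length = a.length := by
  induction l with
  | nil => intro a; rfl
  | cons x l ih =>
    intro a
    simp only [List.foldl_cons]
    rw [ih (fun a y hy => h a y (by simp [hy])), h a x (by simp)]
theorem rowLN_len (n : Nat) (a : List Int) : (rowLN n a).length = a.length := by
  exact foldl_len _ _ (fun a i _ => jC_len _ _ _) a
theorem rowRN_len (n : Nat) (a : List Int) : (rowRN n a).length = a.length := by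
  exact foldl_len _ _ (fun a i _ => jC_len _ _ _) a
theorem rowBN_len (n : Nat) (a : List Int) : (rowBN n a).length = a.length := by
  exact foldl_len _ _ (fun a i _ => jB_len _ _ _) a
theorem rowBDN_len (n : Nat) (a : List Int) : (rowBDN n a).length = a.length := by
  exact foldl_len _ _ (fun a i _ => jB_len _ _ _) a

-- ---- cons-shift facts ----
theorem condN_cons (w : Int) (a : List Int) (i j : Nat) :
    condN (w :: a) (i + 1) (j + 1) = condN a i j := by
  simp [condN]
theorem updN_cons (w : Int) (a : List Int) (i j : Nat) :
    updN (w :: a) (i + 1) (j + 1) = w :: updN a i j := by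
  simp [updN]
theorem stepN_cons (w : Int) (a : List Int) (i j : Nat) :
    stepN (w :: a) (i + 1) (j + 1) = w :: stepN a i j := by
  unfold stepN
  rw [condN_cons]
  split
  · exact updN_cons w a i j
  · rfl
theorem jC_shift (js : List Nat) (i : Nat) (w : Int) (a : List Int) :
    (js.map (· + 1)).foldl (fun a j => stepN a (i + 1) j) (w :: a)
      = w :: js.foldl (fun a j => stepN a i j) a := by
  induction js generalizing a with
  | nil => rfl
  | cons j js ih => simp only [List.map_cons, List.foldl_cons, stepN_cons]; exact ih _
theorem jB_shift (js : List Nat) (i : Nat) (w : Int) (a : List Int) :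
    jB (w :: a) (i + 1) (js.map (· + 1)) = w :: jB a i js := by
  induction js generalizing a with
  | nil => rfl
  | cons j js ih =>
    simp only [List.map_cons]
    unfold jB
    rw [condN_cons]
    split
    · rw [updN_cons]; exact ih _
    · rfl
theorem foldl_cons_shift (is : List Nat) (f g : List Int → Nat → List Int) (w : Int)
    (h : ∀ a i, i ∈ is → f (w :: a) (i + 1) = w :: g a i) :
    ∀ a, (is.map (· + 1)).foldl f (w :: a) = w :: is.foldl g a := by
  induction is with
  | nil => intro a; rfl
  | cons i is ih =>
    intro a
    simp only [List.map_cons, List.foldl_cons]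
    rw [h a i (by simp)]
    exact ih (fun a i hi => h a i (by simp [hi])) _

-- ---- scan lemmas: the first slot of a line equals one absorb pass ----
theorem jC_scan (t : List Int) : ∀ (v : Int) (pre : List Int),
    (List.range' (pre.length + 1) t.length).foldl (fun a j => stepN a 0 j) (v :: (pre ++ t))
      = (absorbAll v t).1 :: (pre ++ (absorbAll v t).2) := by
  induction t with
  | nil => intro v pre; simp [absorbAll]
  | cons x xs ih =>
    intro v pre
    have hg0 : (v :: (pre ++ x :: xs)).getD 0 0 = v := List.getD_cons_zero
    have hgj : (v :: (pre ++ x :: xs)).getD (pre.length + 1) 0 = x := by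
      rw [List.getD_cons_succ, getD_append_len]
    rw [List.length_cons, List.range'_succ, List.foldl_cons]
    by_cases hc : v = 0 ∨ x = v
    · have h1 : condN (v :: (pre ++ x :: xs)) 0 (pre.length + 1) = true := by
        unfold condN; rw [hg0, hgj]; rcases hc with h | h <;> simp [h]
      have h2 : (v == 0 || x == v) = true := by rcases hc with h | h <;> simp [h]
      have hstep : stepN (v :: (pre ++ x :: xs)) 0 (pre.length + 1)
          = (v + x) :: ((pre ++ [0]) ++ xs) := by
        unfold stepN
        simp only [h1, if_true]
        unfold updN
        rw [hg0, hgj, List.set_cons_zero, List.set_cons_succ, set_append_len]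
        simp
      rw [hstep]
      have hL : pre.length + 1 + 1 = (pre ++ [(0 : Int)]).length + 1 := by simp
      rw [hL]
      have IH := ih (v + x) (pre ++ [0])
      simp only [List.append_assoc, List.singleton_append] at IH
      simp only [List.append_assoc, List.singleton_append]
      rw [IH]
      rw [absorbAll_cons, h2]
      simp
    · have h1 : condN (v :: (pre ++ x :: xs)) 0 (pre.length + 1) = false := by
        unfold condN; rw [hg0, hgj]
        simp only [Bool.or_eq_false_iff, beq_eq_false_iff_ne]
        exact ⟨fun h => hc (Or.inr h.symm), fun h => hc (Or.inl h)⟩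
      have h2 : (v == 0 || x == v) = false := by
        simp only [Bool.or_eq_false_iff, beq_eq_false_iff_ne]
        exact ⟨fun h => hc (Or.inl h), fun h => hc (Or.inr h)⟩
      have hstep : stepN (v :: (pre ++ x :: xs)) 0 (pre.length + 1)
          = v :: ((pre ++ [x]) ++ xs) := by
        unfold stepN
        simp only [h1, Bool.false_eq_true, if_false]
        simp
      rw [hstep]
      have hL : pre.length + 1 + 1 = (pre ++ [x]).length + 1 := by simp
      rw [hL]
      have IH := ih v (pre ++ [x])
      simp only [List.append_assoc, List.singleton_append] at IH
      simp only [List.append_assoc, List.singleton_append]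
      rw [IH]
      rw [absorbAll_cons, h2]
      simp

theorem jB_scan (t : List Int) : ∀ (v : Int) (pre : List Int),
    jB (v :: (pre ++ t)) 0 (List.range' (pre.length + 1) t.length)
      = (absorbBreak v t).1 :: (pre ++ (absorbBreak v t).2) := by
  induction t with
  | nil => intro v pre; simp [absorbBreak, jB]
  | cons x xs ih =>
    intro v pre
    have hg0 : (v :: (pre ++ x :: xs)).getD 0 0 = v := List.getD_cons_zero
    have hgj : (v :: (pre ++ x :: xs)).getD (pre.length + 1) 0 = x := by
      rw [List.getD_cons_succ, getD_append_len]
    rw [List.length_cons, List.range'_succ]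
    by_cases hc : v = 0 ∨ x = v
    · have h1 : condN (v :: (pre ++ x :: xs)) 0 (pre.length + 1) = true := by
        unfold condN; rw [hg0, hgj]; rcases hc with h | h <;> simp [h]
      have h2 : (v == 0 || x == v) = true := by rcases hc with h | h <;> simp [h]
      have hupd : updN (v :: (pre ++ x :: xs)) 0 (pre.length + 1)
          = (v + x) :: ((pre ++ [0]) ++ xs) := by
        unfold updN
        rw [hg0, hgj, List.set_cons_zero, List.set_cons_succ, set_append_len]
        simp
      unfold jB
      simp only [h1, if_true]
      rw [hupd]
      have hL : pre.length + 1 + 1 = (pre ++ [(0 : Int)]).length + 1 := by simp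
      rw [hL]
      have IH := ih (v + x) (pre ++ [0])
      simp only [List.append_assoc, List.singleton_append] at IH
      simp only [List.append_assoc, List.singleton_append]
      rw [IH]
      rw [absorbBreak_cons, h2]
      simp
    · have h1 : condN (v :: (pre ++ x :: xs)) 0 (pre.length + 1) = false := by
        unfold condN; rw [hg0, hgj]
        simp only [Bool.or_eq_false_iff, beq_eq_false_iff_ne]
        exact ⟨fun h => hc (Or.inr h.symm), fun h => hc (Or.inl h)⟩
      have h2 : (v == 0 || x == v) = false := by
        simp only [Bool.or_eq_false_iff, beq_eq_false_iff_ne]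
        exact ⟨fun h => hc (Or.inl h), fun h => hc (Or.inr h)⟩
      unfold jB
      simp only [h1, Bool.false_eq_true, if_false]
      rw [absorbBreak_cons, h2]
      simp

theorem rowLN_eq : ∀ (n : Nat) (a : List Int), a.length = n → rowLN n a = lineCont a := by
  intro n
  induction n using Nat.strong_induction_on with
  | _ n ih =>
    intro a ha
    match a with
    | [] => simp [← ha, rowLN, lineCont]
    | [v] => simp [← ha, rowLN, lineCont]
    | v :: b :: t =>
      subst ha
      show rowLN (t.length + 2) (v :: b :: t) = _
      unfold rowLN
      have hr : List.range (t.length + 2 - 1) = 0 :: (List.range (t.length)).map (· + 1) := by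
        rw [show t.length + 2 - 1 = t.length + 1 from rfl, List.range_succ_eq_map]
      rw [hr, List.foldl_cons]
      have hfirst : (List.range' (0 + 1) (t.length + 2 - 1 - 0)).foldl
            (fun a j => stepN a 0 j) (v :: b :: t)
          = (absorbAll v (b :: t)).1 :: (absorbAll v (b :: t)).2 := by
        have := jC_scan (b :: t) v []
        simpa using this
      rw [hfirst]
      set A := absorbAll v (b :: t) with hA
      have hlenA : A.2.length = t.length + 1 := by rw [hA, absorbAll_len]; rfl
      have hshift : ((List.range t.length).map (· + 1)).foldl
            (fun a i => (List.range' (i + 1) (t.length + 2 - 1 - i)).foldl (fun a j => stepN a i j) a)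
            (A.1 :: A.2)
          = A.1 :: (List.range t.length).foldl
            (fun a i => (List.range' (i + 1) (t.length + 1 - 1 - i)).foldl (fun a j => stepN a i j) a)
            A.2 := by
        apply foldl_cons_shift
        intro a i hi
        simp only [List.mem_range] at hi
        have h1 : t.length + 2 - 1 - (i + 1) = t.length - i := by omega
        have h2 : t.length + 1 - 1 - i = t.length - i := by omega
        rw [h1, h2, range'_shift (i + 1) (t.length - i), jC_shift]
      rw [hshift]
      have hrec : (List.range t.length).foldl
            (fun a i => (List.range' (i + 1) (t.length + 1 - 1 - i)).foldl (fun a j => stepN a i j) a)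
            A.2 = rowLN (t.length + 1) A.2 := by
        unfold rowLN
        rfl
      rw [hrec, ih (t.length + 1) (by simp only [List.length_cons]; omega) A.2 hlenA]
      conv_rhs => rw [lineCont]
theorem rowBN_eq : ∀ (n : Nat) (a : List Int), a.length = n → rowBN n a = lineBreak a := by
  intro n
  induction n using Nat.strong_induction_on with
  | _ n ih =>
    intro a ha
    match a with
    | [] => simp [← ha, rowBN, lineBreak]
    | [v] => simp [← ha, rowBN, lineBreak]
    | v :: b :: t =>
      subst ha
      show rowBN (t.length + 2) (v :: b :: t) = _
      unfold rowBN
      have hr : List.range (t.length + 2 - 1) = 0 :: (List.range (t.length)).map (· + 1) := by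
        rw [show t.length + 2 - 1 = t.length + 1 from rfl, List.range_succ_eq_map]
      rw [hr, List.foldl_cons]
      have hfirst : jB (v :: b :: t) 0 (List.range' (0 + 1) (t.length + 2 - 1 - 0))
          = (absorbBreak v (b :: t)).1 :: (absorbBreak v (b :: t)).2 := by
        have := jB_scan (b :: t) v []
        simpa using this
      rw [hfirst]
      set A := absorbBreak v (b :: t) with hA
      have hlenA : A.2.length = t.length + 1 := by rw [hA, absorbBreak_len]; rfl
      have hshift : ((List.range t.length).map (· + 1)).foldl
            (fun a i => jB a i (List.range' (i + 1) (t.length + 2 - 1 - i)))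
            (A.1 :: A.2)
          = A.1 :: (List.range t.length).foldl
            (fun a i => jB a i (List.range' (i + 1) (t.length + 1 - 1 - i))) A.2 := by
        apply foldl_cons_shift
        intro a i hi
        simp only [List.mem_range] at hi
        have h1 : t.length + 2 - 1 - (i + 1) = t.length - i := by omega
        have h2 : t.length + 1 - 1 - i = t.length - i := by omega
        rw [h1, h2, range'_shift (i + 1) (t.length - i), jB_shift]
      rw [hshift]
      have hrec : (List.range t.length).foldl
            (fun a i => jB a i (List.range' (i + 1) (t.length + 1 - 1 - i))) A.2
          = rowBN (t.length + 1) A.2 := by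
        unfold rowBN
        rfl
      rw [hrec, ih (t.length + 1) (by simp only [List.length_cons]; omega) A.2 hlenA]
      conv_rhs => rw [lineBreak]

-- reversal conjugation
theorem condN_rev (a : List Int) (i j : Nat) (hi : i < a.length) (hj : j < a.length) :
    condN a.reverse (a.length - 1 - i) (a.length - 1 - j) = condN a i j := by
  unfold condN
  rw [getD_reverse a i hi, getD_reverse a j hj]
theorem updN_rev (a : List Int) (i j : Nat) (hi : i < a.length) (hj : j < a.length) :
    updN a.reverse (a.length - 1 - i) (a.length - 1 - j) = (updN a i j).reverse := by
  unfold updN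
  rw [reverse_set (a.set i (a.getD i 0 + a.getD j 0)) j 0 (by simpa using hj),
    reverse_set a i _ hi]
  simp only [List.length_set]
  rw [getD_reverse a i hi, getD_reverse a j hj]
theorem stepN_rev (a : List Int) (i j : Nat) (hi : i < a.length) (hj : j < a.length) :
    stepN a.reverse (a.length - 1 - i) (a.length - 1 - j) = (stepN a i j).reverse := by
  unfold stepN
  rw [condN_rev a i j hi hj]
  split
  · exact updN_rev a i j hi hj
  · rfl
theorem foldl_rev_conj {γ : Type} (n : Nat) (l : List γ) (f g : List Int → γ → List Int)
    (hlen : ∀ a x, x ∈ l → (g a x).length = a.length)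
    (h : ∀ a x, x ∈ l → a.length = n → f a.reverse x = (g a x).reverse) :
    ∀ a : List Int, a.length = n → l.foldl f a.reverse = (l.foldl g a).reverse := by
  induction l with
  | nil => intro a _; rfl
  | cons x l ih =>
    intro a ha
    simp only [List.foldl_cons]
    rw [h a x (by simp) ha]
    exact ih (fun a y hy => hlen a y (by simp [hy])) (fun a y hy => h a y (by simp [hy])) _
      (by rw [hlen a x (by simp), ha])
theorem jB_rev (js : List Nat) : ∀ (a : List Int) (i : Nat), i < a.length →
    (∀ j ∈ js, j < a.length) →
    jB a.reverse (a.length - 1 - i) (js.map (fun j => a.length - 1 - j)) = (jB a i js).reverse := by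
  induction js with
  | nil => intro a i _ _; rfl
  | cons j js ih =>
    intro a i hi hjs
    have hj : j < a.length := hjs j (by simp)
    simp only [List.map_cons]
    unfold jB
    rw [condN_rev a i j hi hj]
    split
    · rw [updN_rev a i j hi hj]
      have := ih (updN a i j) i (by rw [updN_len]; exact hi)
        (fun y hy => by rw [updN_len]; exact hjs y (by simp [hy]))
      rw [updN_len] at this
      exact this
    · rfl
theorem rowRN_eq : ∀ (n : Nat) (a : List Int), a.length = n →
    rowRN n a = (lineCont a.reverse).reverse := by
  intro n a ha
  have key : rowRN n a = (rowLN n a.reverse).reverse := by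
    unfold rowRN rowLN
    rw [List.foldl_map]
    have conj := foldl_rev_conj n (List.range (n - 1))
      (fun b t => (List.range' (t + 1) (n - 1 - t)).foldl (fun b j => stepN b t j) b)
      (fun b t => ((List.range (n - 1 - t)).map (fun s => n - 1 - t - 1 - s)).foldl
        (fun b j => stepN b (n - 1 - t) j) b)
      (fun b t _ => foldl_len _ _ (fun c j _ => stepN_len c _ j) b)
      ?_ a ha
    · rw [conj]
      simp
    · intro b t ht hb
      dsimp only
      simp only [List.mem_range] at ht
      rw [List.foldl_map]
      rw [List.range'_eq_map_range, List.foldl_map]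
      exact foldl_rev_conj n (List.range (n - 1 - t))
        (fun b s => stepN b t (t + 1 + s))
        (fun b s => stepN b (n - 1 - t) (n - 1 - t - 1 - s))
        (fun b s _ => stepN_len b _ _)
        (by
          intro b s hs hb
          simp only [List.mem_range] at hs
          have hi : n - 1 - t < b.length := by omega
          have hj : n - 1 - t - 1 - s < b.length := by omega
          have h := stepN_rev b (n - 1 - t) (n - 1 - t - 1 - s) hi hj
          have e1 : b.length - 1 - (n - 1 - t) = t := by omega
          have e2 : b.length - 1 - (n - 1 - t - 1 - s) = t + 1 + s := by omega
          rw [e1, e2] at h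
          exact h) b hb
  rw [key, rowLN_eq n a.reverse (by simp [ha])]
theorem rowBDN_eq : ∀ (n : Nat) (a : List Int), a.length = n →
    rowBDN n a = (lineBreak a.reverse).reverse := by
  intro n a ha
  have key : rowBDN n a = (rowBN n a.reverse).reverse := by
    unfold rowBDN rowBN
    rw [List.foldl_map]
    have conj := foldl_rev_conj n (List.range (n - 1))
      (fun b t => jB b t (List.range' (t + 1) (n - 1 - t)))
      (fun b t => jB b (n - 1 - t) ((List.range (n - 1 - t)).map (fun s => n - 1 - t - 1 - s)))
      (fun b t _ => jB_len _ _ b)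
      ?_ a ha
    · rw [conj]
      simp
    · intro b t ht hb
      dsimp only
      simp only [List.mem_range] at ht
      have hi : n - 1 - t < b.length := by omega
      have hjv : ∀ y ∈ (List.range (n - 1 - t)).map (fun s => n - 1 - t - 1 - s), y < b.length := by
        intro y hy
        simp only [List.mem_map, List.mem_range] at hy
        obtain ⟨s, hs, rfl⟩ := hy
        omega
      have h := jB_rev ((List.range (n - 1 - t)).map (fun s => n - 1 - t - 1 - s)) b (n - 1 - t) hi hjv
      have e1 : b.length - 1 - (n - 1 - t) = t := by omega
      have hjs : ((List.range (n - 1 - t)).map (fun s => n - 1 - t - 1 - s)).map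
            (fun j => b.length - 1 - j) = List.range' (t + 1) (n - 1 - t) := by
        rw [List.map_map, List.range'_eq_map_range]
        apply List.map_congr_left
        intro s hs
        simp only [List.mem_range] at hs
        simp only [Function.comp_apply]
        omega
      rw [e1, hjs] at h
      exact h
  rw [key, rowBN_eq n a.reverse (by simp [ha])]

-- ---- pyRange conversions ----
theorem castRangeAsc (s e : Nat) :
    PySem.List.pyRange (s : Int) (e : Int) 1 = (List.range' s (e - s)).map Nat.cast := by
  rw [PySem.List.pyRange_one]
  have ht : (((e : Int)) - (s : Int)).toNat = e - s := by omega
  rw [ht, List.range'_eq_map_range, List.map_map]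
  apply List.map_congr_left
  intro k _
  simp only [Function.comp_apply]
  push_cast
  ring
theorem descRange (i : Nat) :
    PySem.List.pyRange ((i : Int) - 1) (-1) (-1)
      = ((List.range i).map (fun t => i - 1 - t)).map Nat.cast := by
  rw [PySem.List.pyRange_neg_one]
  have ht : (((i : Int) - 1) - (-1)).toNat = i := by omega
  rw [ht, List.map_map]
  apply List.map_congr_left
  intro k hk
  simp only [List.mem_range] at hk
  simp only [Function.comp_apply]
  omega
theorem descRangeTop (n : Nat) (h : 1 ≤ n) :
    PySem.List.pyRange ((n : Int) - 1) 0 (-1)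
      = ((List.range (n - 1)).map (fun t => n - 1 - t)).map Nat.cast := by
  rw [PySem.List.pyRange_neg_one]
  have ht : (((n : Int) - 1) - 0).toNat = n - 1 := by omega
  rw [ht, List.map_map]
  apply List.map_congr_left
  intro k hk
  simp only [List.mem_range] at hk
  simp only [Function.comp_apply]
  omega

-- ---- row-lens fold ----
theorem set_local_foldl {γ : Type} (n k : Nat) (l : List γ) (g : List Int → γ → List Int)
    (body : List (List Int) → γ → List (List Int)) (hk : k < n)
    (hg : ∀ r x, x ∈ l → r.length = n → (g r x).length = n)
    (hb : ∀ m x, x ∈ l → sqm n m → body m x = m.set k (g (m.getD k []) x)) :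
    ∀ m, sqm n m → l.foldl body m = m.set k (l.foldl g (m.getD k [])) := by
  induction l with
  | nil =>
    intro m hm
    have hk' : k < m.length := by rw [hm.1]; exact hk
    simp only [List.foldl_nil]
    rw [List.getD_eq_getElem m [] hk', List.set_getElem_self]
  | cons x l ih =>
    intro m hm
    have hk' : k < m.length := by rw [hm.1]; exact hk
    have hr : (m.getD k []).length = n := by
      rw [List.getD_eq_getElem m [] hk']
      exact hm.2 _ (List.getElem_mem hk')
    simp only [List.foldl_cons]
    rw [hb m x (by simp) hm]
    have hm' : sqm n (m.set k (g (m.getD k []) x)) := by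
      constructor
      · simp [hm.1]
      · intro r hrr
        rcases List.mem_or_eq_of_mem_set hrr with h | h
        · exact hm.2 r h
        · subst h; exact hg _ x (by simp) hr
    rw [ih (fun r y hy hr => hg r y (by simp [hy]) hr) (fun m' y hy hm' => hb m' y (by simp [hy]) hm') _ hm']
    have hset : (m.set k (g (m.getD k []) x)).getD k [] = g (m.getD k []) x := by
      rw [List.getD_eq_getElem _ [] (by simpa using hk'), List.getElem_set_self (by simpa using hk')]
    rw [hset, List.set_set]

theorem foldl_k_rows (n : Nat) (F : List Int → List Int) (body : List (List Int) → Nat → List (List Int))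
    (hF : ∀ r, r.length = n → (F r).length = n)
    (hb : ∀ m k, k < n → sqm n m → body m k = m.set k (F (m.getD k []))) :
    ∀ (post pre : List (List Int)), (∀ r ∈ pre ++ post, r.length = n) →
      (pre ++ post).length = n →
      (List.range' pre.length post.length).foldl body (pre ++ post) = pre ++ post.map F := by
  intro post
  induction post with
  | nil => intro pre _ _; simp
  | cons h t ih =>
    intro pre hrows hlen
    have hkn : pre.length < n := by
      rw [← hlen]; simp
    rw [List.length_cons, List.range'_succ, List.foldl_cons]
    rw [hb (pre ++ h :: t) pre.length hkn ⟨hlen, hrows⟩]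
    rw [getD_append_len, set_append_len]
    have hFh : (F h).length = n := hF h (hrows h (by simp))
    have hstep : pre.length + 1 = (pre ++ [F h]).length := by simp
    have hre : pre ++ F h :: t = (pre ++ [F h]) ++ t := by simp
    rw [hstep, hre, ih (pre ++ [F h])
      (by
        intro r hr
        simp only [List.append_assoc, List.singleton_append, List.mem_append, List.mem_cons] at hr
        rcases hr with h1 | h2 | h3
        · exact hrows r (by simp [h1])
        · subst h2; exact hFh
        · exact hrows r (by simp [h3]))
      (by simpa using hlen)]
    simp

-- ---- column lens ----
theorem colGet_len (k : Nat) (m : List (List Int)) : (colGet k m).length = m.length := by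
  simp [colGet]
theorem colGet_getD (k i : Nat) (m : List (List Int)) (hi : i < m.length) :
    (colGet k m).getD i 0 = (m.getD i []).getD k 0 := by
  rw [List.getD_eq_getElem _ 0 (by simpa [colGet] using hi), List.getD_eq_getElem m [] hi]
  simp [colGet]
theorem colSet_sq (n k : Nat) (c : List Int) (m : List (List Int)) (hk : k < n)
    (hsq : sqm n m) (hc : c.length = n) : sqm n (colSet k c m) := by
  constructor
  · simp [colSet, hsq.1, hc]
  · intro r hr
    obtain ⟨p, hp, rfl⟩ := List.mem_iff_getElem.mp hr
    have hp' : p < m.length := by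
      simp only [colSet, List.length_zipWith] at hp; omega
    simp only [colSet, List.getElem_zipWith, List.length_set]
    exact hsq.2 _ (List.getElem_mem hp')
theorem colGet_colSet (n k : Nat) (c : List Int) (m : List (List Int)) (hk : k < n)
    (hsq : sqm n m) (hc : c.length = n) : colGet k (colSet k c m) = c := by
  apply List.ext_getElem (by simp [colGet, colSet, hsq.1, hc])
  intro p hp hp'
  have hpm : p < m.length := by
    simp only [colGet, colSet, List.length_map, List.length_zipWith] at hp; omega
  have hkp : k < m[p].length := by
    rw [hsq.2 _ (List.getElem_mem hpm)]; exact hk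
  simp only [colGet, colSet, List.getElem_map, List.getElem_zipWith]
  rw [List.getD_eq_getElem _ 0 (by simpa using hkp), List.getElem_set]
  simp
theorem colSet_colSet (k : Nat) (c c' : List Int) (m : List (List Int)) (hc : c.length = m.length) (hc' : c'.length = m.length) :
    colSet k c' (colSet k c m) = colSet k c' m := by
  apply List.ext_getElem (by simp [colSet, hc, hc'])
  intro p hp hp'
  have hpm : p < m.length := by
    simp only [colSet, List.length_zipWith] at hp; omega
  have hpc : p < c.length := by omega
  have hpc' : p < c'.length := by
    simp only [colSet, List.length_zipWith] at hp'; omega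
  simp only [colSet, List.getElem_zipWith, List.set_set]
theorem colSet_colGet (n k : Nat) (m : List (List Int)) (hk : k < n) (hsq : sqm n m) :
    colSet k (colGet k m) m = m := by
  apply List.ext_getElem (by simp [colSet, colGet])
  intro p hp hp'
  have hpm : p < m.length := by
    simp only [colSet, List.length_zipWith] at hp; omega
  have hk' : k < m[p].length := by
    rw [hsq.2 _ (List.getElem_mem hpm)]; exact hk
  simp only [colSet, colGet, List.getElem_zipWith, List.getElem_map]
  rw [List.getD_eq_getElem _ 0 hk', List.set_getElem_self]

theorem colset_local_foldl {γ : Type} (n k : Nat) (l : List γ) (g : List Int → γ → List Int)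
    (body : List (List Int) → γ → List (List Int)) (hk : k < n)
    (hg : ∀ c x, x ∈ l → c.length = n → (g c x).length = n)
    (hb : ∀ m x, x ∈ l → sqm n m → body m x = colSet k (g (colGet k m) x) m) :
    ∀ m, sqm n m → l.foldl body m = colSet k (l.foldl g (colGet k m)) m := by
  induction l with
  | nil =>
    intro m hm
    simp only [List.foldl_nil]
    exact (colSet_colGet n k m hk hm).symm
  | cons x l ih =>
    intro m hm
    have hc : (colGet k m).length = n := by rw [colGet_len, hm.1]
    simp only [List.foldl_cons]
    rw [hb m x (by simp) hm]
    have hgc : (g (colGet k m) x).length = n := hg _ x (by simp) hc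
    have hm' : sqm n (colSet k (g (colGet k m) x) m) := colSet_sq n k _ m hk hm hgc
    rw [ih (fun c y hy hc => hg c y (by simp [hy]) hc) (fun m' y hy hm' => hb m' y (by simp [hy]) hm') _ hm']
    have hfold : ∀ (l' : List γ), (∀ c y, y ∈ l' → c.length = n → (g c y).length = n) →
        ∀ c : List Int, c.length = n → (l'.foldl g c).length = n := by
      intro l' hg'
      induction l' with
      | nil => intro c hc; simpa
      | cons y l' ih' =>
        intro c hc
        simp only [List.foldl_cons]
        exact ih' (fun c z hz => hg' c z (by simp [hz])) _ (hg' c y (by simp) hc)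
    rw [colGet_colSet n k _ m hk hm hgc,
      colSet_colSet k _ _ m (by rw [hgc, hm.1])
        (by rw [hm.1]; exact hfold l (fun c y hy => hg c y (by simp [hy])) _ hgc)]

-- ---- zipT facts ----
theorem zipT_nil : zipT [] = [] := by
  rw [zipT]

theorem zipT_cons (r : List Int) (rs : List (List Int)) :
    zipT (r :: rs) = if (r :: rs).all (fun row => !row.isEmpty)
      then ((r :: rs).map (fun row => row.headD 0)) :: zipT ((r :: rs).map List.tail)
      else [] := by
  rw [zipT]
  split_ifs <;> rfl

theorem zipT_eq_of_rect (L : Nat) : ∀ (m : List (List Int)), m ≠ [] →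
    (∀ r ∈ m, r.length = L) → zipT m = (List.range L).map (fun k => colGet k m) := by
  induction L with
  | zero =>
    intro m hm hr
    match m with
    | r :: rs =>
      rw [zipT_cons]
      have hre : r = [] := List.eq_nil_of_length_eq_zero (hr r (by simp))
      simp [hre]
  | succ L ih =>
    intro m hm hr
    match m with
    | r :: rs =>
      rw [zipT_cons]
      have hall : (r :: rs).all (fun row => !row.isEmpty) = true := by
        rw [List.all_eq_true]
        intro row hrow
        have hlr := hr row hrow
        simp only [Bool.not_eq_true', List.isEmpty_eq_false_iff]
        intro hnil
        rw [hnil] at hlr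
        simp at hlr
      rw [if_pos hall]
      rw [ih ((r :: rs).map List.tail) (by simp)
        (by
          intro rr hrr
          obtain ⟨row, hrow, rfl⟩ := List.mem_map.mp hrr
          simp [List.length_tail, hr row hrow])]
      have hhead : (r :: rs).map (fun row => row.headD 0) = colGet 0 (r :: rs) := by
        unfold colGet
        apply List.map_congr_left
        intro row hrow
        match row with
        | [] => exfalso; have := hr [] hrow; simp at this
        | x :: xs => rfl
      have htail : ∀ k ∈ List.range L,
          colGet k ((r :: rs).map List.tail) = colGet (k + 1) (r :: rs) := by
        intro k _
        unfold colGet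
        rw [List.map_map]
        apply List.map_congr_left
        intro row hrow
        match row with
        | [] => exfalso; have := hr [] hrow; simp at this
        | x :: xs => rfl
      rw [List.range_succ_eq_map]
      rw [show List.map (fun k => colGet k (r :: rs)) (0 :: List.map Nat.succ (List.range L))
            = colGet 0 (r :: rs) :: List.map ((fun k => colGet k (r :: rs)) ∘ Nat.succ) (List.range L)
          from by rw [List.map_cons, List.map_map]]
      rw [hhead]
      congr 1
      apply List.map_congr_left
      intro k hk
      rw [htail k hk]
      rfl

theorem zipT_sq (n : Nat) (m : List (List Int)) (hsq : sqm n m) : sqm n (zipT m) := by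
  match m with
  | [] =>
    have : n = 0 := by have := hsq.1; simpa using this.symm
    subst this
    exact ⟨by rw [zipT_nil]; rfl, by intro r hr; rw [zipT_nil] at hr; simp at hr⟩
  | r :: rs =>
    rw [zipT_eq_of_rect n (r :: rs) (by simp) hsq.2]
    constructor
    · simp
    · intro c hc
      obtain ⟨k, _, rfl⟩ := List.mem_map.mp hc
      rw [colGet_len, hsq.1]

theorem zipT_getD (n k : Nat) (m : List (List Int)) (hsq : sqm n m) (hk : k < n) :
    (zipT m).getD k [] = colGet k m := by
  match m with
  | [] => exfalso; have := hsq.1; simp at this; omega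
  | r :: rs =>
    rw [zipT_eq_of_rect n (r :: rs) (by simp) hsq.2]
    rw [List.getD_eq_getElem _ [] (by simpa using hk)]
    simp

theorem colGet_zipT (n k : Nat) (m : List (List Int)) (hsq : sqm n m) (hk : k < n) :
    colGet k (zipT m) = m.getD k [] := by
  match m with
  | [] => exfalso; have := hsq.1; simp at this; omega
  | r :: rs =>
    have hkm : k < (r :: rs).length := by rw [hsq.1]; exact hk
    rw [zipT_eq_of_rect n (r :: rs) (by simp) hsq.2]
    have hrow : ((r :: rs).getD k []).length = n :=
      by rw [List.getD_eq_getElem _ [] hkm]; exact hsq.2 _ (List.getElem_mem hkm)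
    have h1 : colGet k ((List.range n).map (fun j => colGet j (r :: rs)))
        = (List.range n).map (fun j => (colGet j (r :: rs)).getD k 0) := by
      unfold colGet
      rw [List.map_map]
      rfl
    rw [h1]
    have h2 : (List.range n).map (fun j => (colGet j (r :: rs)).getD k 0)
        = (List.range n).map (fun j => ((r :: rs).getD k []).getD j 0) := by
      apply List.map_congr_left
      intro j hj
      exact colGet_getD j k (r :: rs) hkm
    rw [h2, ← hrow, map_getD_range]

theorem zipT_zipT (n : Nat) (m : List (List Int)) (hsq : sqm n m) : zipT (zipT m) = m := by
  match m with
  | [] => rw [zipT_nil, zipT_nil]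
  | r :: rs =>
    have hn : 0 < n := by have := hsq.1; simp at this; omega
    have hz := zipT_sq n (r :: rs) hsq
    have hzne : zipT (r :: rs) ≠ [] := by
      intro h
      rw [h] at hz
      have := hz.1
      simp at this
      omega
    rw [zipT_eq_of_rect n (zipT (r :: rs)) hzne hz.2]
    have : (List.range n).map (fun k => colGet k (zipT (r :: rs)))
        = (List.range n).map (fun k => (r :: rs).getD k []) := by
      apply List.map_congr_left
      intro k hk
      simp only [List.mem_range] at hk
      exact colGet_zipT n k (r :: rs) hsq hk
    rw [this, ← hsq.1, map_getD_range]

theorem zipT_set (n k : Nat) (c : List Int) (m : List (List Int)) (hsq : sqm n m) (hk : k < n)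
    (hc : c.length = n) : zipT ((zipT m).set k c) = colSet k c m := by
  have hz := zipT_sq n m hsq
  have hM : sqm n ((zipT m).set k c) := by
    constructor
    · simp [hz.1]
    · intro r hr
      rcases List.mem_or_eq_of_mem_set hr with h | h
      · exact hz.2 r h
      · subst h; exact hc
  have hMne : (zipT m).set k c ≠ [] := by
    intro h
    have := hM.1
    rw [h] at this
    simp at this
    omega
  rw [zipT_eq_of_rect n _ hMne hM.2]
  apply List.ext_getElem
  · simp [colSet, hsq.1, hc]
  · intro i hi hi'
    have hin : i < n := by simpa using hi
    have him : i < m.length := by rw [hsq.1]; exact hin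
    simp only [List.getElem_map, List.getElem_range, colSet, List.getElem_zipWith]
    -- colGet i ((zipT m).set k c) = m[i].set k c[i]
    apply List.ext_getElem
    · simp [colGet, hz.1, hsq.2 _ (List.getElem_mem him)]
    · intro p hp hp'
      have hpn : p < n := by simpa [colGet, hz.1] using hp
      have hpz : p < (zipT m).length := by rw [hz.1]; exact hpn
      simp only [colGet, List.getElem_map, List.getElem_set]
      split_ifs with h1
      · -- k = p on both
        rw [List.getD_eq_getElem c 0 (by rw [hc]; exact hin)]
      · -- p ≠ k
        have hmne : m ≠ [] := by
          intro h
          rw [h] at him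
          simp at him
        have hzp : (zipT m)[p] = colGet p m := by
          have hre := zipT_eq_of_rect n m hmne hsq.2
          simp only [hre, List.getElem_map, List.getElem_range]
        rw [hzp, colGet_getD p i m him, List.getD_eq_getElem m [] him,
          List.getD_eq_getElem _ 0 (by
            rw [hsq.2 _ (List.getElem_mem him)]; exact hpn)]

theorem foldl_zipT_conj (n : Nat) (l : List Nat)
    (body body' : List (List Int) → Nat → List (List Int))
    (hb : ∀ m k, k ∈ l → sqm n m → body m k = zipT (body' (zipT m) k))
    (hb' : ∀ M k, k ∈ l → sqm n M → sqm n (body' M k)) :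
    ∀ m, sqm n m → l.foldl body m = zipT (l.foldl body' (zipT m)) := by
  induction l with
  | nil => intro m hm; exact (zipT_zipT n m hm).symm
  | cons x l ih =>
    intro m hm
    have hzm := zipT_sq n m hm
    have hM1 : sqm n (body' (zipT m) x) := hb' _ x (by simp) hzm
    simp only [List.foldl_cons]
    rw [hb m x (by simp) hm]
    rw [ih (fun m' y hy hm' => hb m' y (by simp [hy]) hm')
      (fun M y hy hM => hb' M y (by simp [hy]) hM) _ (zipT_sq n _ hM1)]
    rw [zipT_zipT n _ hM1]

-- ---- matrix step bridges ----
theorem row_step (n k i j : Nat) (m : List (List Int)) (hk : k < n) (hsq : sqm n m) :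
    (if aget m k i == aget m k j || aget m k i == 0 then
        aset (aset m k i (aget m k i + aget m k j)) k j 0
      else m) = m.set k (stepN (m.getD k []) i j) := by
  have hk' : k < m.length := by rw [hsq.1]; exact hk
  unfold aget aset stepN condN updN
  simp only [PySem.List.pyGetD_natCast, PySem.List.pySetD_natCast]
  by_cases hb : ((m.getD k []).getD i 0 == (m.getD k []).getD j 0 || (m.getD k []).getD i 0 == 0) = true
  · rw [if_pos hb, if_pos hb]
    have hA : (m.set k ((m.getD k []).set i ((m.getD k []).getD i 0 + (m.getD k []).getD j 0))).getD k []
        = (m.getD k []).set i ((m.getD k []).getD i 0 + (m.getD k []).getD j 0) := by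
      rw [List.getD_eq_getElem _ [] (by simpa using hk'), List.getElem_set]
      simp
    rw [hA, List.set_set]
  · rw [if_neg hb, if_neg hb]
    rw [List.getD_eq_getElem m [] hk', List.set_getElem_self]
theorem col_step (n k i j : Nat) (m : List (List Int)) (hk : k < n) (hi : i < n) (hj : j < n)
    (hij : i ≠ j) (hsq : sqm n m) :
    (if aget m i k == aget m j k || aget m i k == 0 then
        aset (aset m i k (aget m i k + aget m j k)) j k 0
      else m) = colSet k (stepN (colGet k m) i j) m ∧
    (aget m i k == aget m j k || aget m i k == 0) = condN (colGet k m) i j := by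
  have hi' : i < m.length := by rw [hsq.1]; exact hi
  have hj' : j < m.length := by rw [hsq.1]; exact hj
  have hcond : (aget m i k == aget m j k || aget m i k == 0) = condN (colGet k m) i j := by
    unfold aget condN
    simp only [PySem.List.pyGetD_natCast]
    rw [colGet_getD k i m hi', colGet_getD k j m hj']
  refine ⟨?_, hcond⟩
  rw [hcond]
  unfold stepN
  by_cases hb : condN (colGet k m) i j = true
  · rw [if_pos hb, if_pos hb]
    unfold aset aget
    simp only [PySem.List.pyGetD_natCast, PySem.List.pySetD_natCast]
    have hA : (m.set i ((m.getD i []).set k ((m.getD i []).getD k 0 + (m.getD j []).getD k 0))).getD j []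
        = m.getD j [] := by
      rw [List.getD_eq_getElem _ [] (by simpa using hj'), List.getElem_set, if_neg hij]
      exact (List.getD_eq_getElem m [] hj').symm
    rw [hA]
    apply List.ext_getElem
    · simp [colSet, updN, colGet]
    · intro p hp hp'
      have hpm : p < m.length := by simpa using hp
      have hcu : p < (updN (colGet k m) i j).length := by
        simp [updN, colGet]; omega
      simp only [colSet, List.getElem_zipWith, List.getElem_set, updN]
      by_cases hpj : j = p
      · subst hpj
        rw [if_pos rfl, if_pos rfl, List.getD_eq_getElem m [] hj']
      · rw [if_neg hpj, if_neg hpj]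
        by_cases hpi : i = p
        · subst hpi
          rw [if_pos rfl, if_pos rfl]
          have e1 : (colGet k m).getD i 0 = (m.getD i []).getD k 0 := colGet_getD k i m hi'
          have e2 : (colGet k m).getD j 0 = (m.getD j []).getD k 0 := colGet_getD k j m hj'
          have e3 : m.getD i [] = m[i] := List.getD_eq_getElem m [] hi'
          simp only [e1, e2, e3]
        · rw [if_neg hpi, if_neg hpi]
          have hcp : (colGet k m)[p]'(by rw [colGet_len]; exact hpm) = m[p].getD k 0 := by
            simp [colGet]
          have hkp : k < m[p].length := by rw [hsq.2 _ (List.getElem_mem hpm)]; exact hk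
          rw [hcp, List.getD_eq_getElem _ 0 hkp, List.set_getElem_self]
  · rw [if_neg hb, if_neg hb]
    exact (colSet_colGet n k m hk hsq).symm
theorem ujloop_col (n k i : Nat) (js : List Nat) (hk : k < n) (hi : i < n) :
    ∀ m, sqm n m → (∀ j ∈ js, j < n ∧ i ≠ j) →
    ujloop m (k : Int) (i : Int) (js.map Nat.cast) = colSet k (jB (colGet k m) i js) m := by
  induction js with
  | nil =>
    intro m hm _
    show m = colSet k (colGet k m) m
    exact (colSet_colGet n k m hk hm).symm
  | cons j js ih =>
    intro m hm hjv
    have hj : j < n := (hjv j (by simp)).1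
    have hij : i ≠ j := (hjv j (by simp)).2
    obtain ⟨hstep, hcond⟩ := col_step n k i j m hk hi hj hij hm
    simp only [List.map_cons]
    show (if aget m (i : Int) (k : Int) == aget m (j : Int) (k : Int) || aget m (i : Int) (k : Int) == 0 then
        ujloop (aset (aset m (i : Int) (k : Int) (aget m (i : Int) (k : Int) + aget m (j : Int) (k : Int))) (j : Int) (k : Int) 0) (k : Int) (i : Int) (js.map Nat.cast)
      else m) = _
    by_cases hb : condN (colGet k m) i j = true
    · rw [if_pos (by rw [hcond]; exact hb)]
      have hstep' : aset (aset m (i : Int) (k : Int) (aget m (i : Int) (k : Int) + aget m (j : Int) (k : Int))) (j : Int) (k : Int) 0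
          = colSet k (updN (colGet k m) i j) m := by
        have := hstep
        rw [if_pos (by rw [hcond]; exact hb)] at this
        rw [this]
        unfold stepN
        rw [if_pos hb]
      rw [hstep']
      have hc : (colGet k m).length = n := by rw [colGet_len, hm.1]
      have hu : (updN (colGet k m) i j).length = n := by rw [updN_len, hc]
      have hm' : sqm n (colSet k (updN (colGet k m) i j) m) := colSet_sq n k _ m hk hm hu
      rw [ih _ hm' (fun y hy => hjv y (by simp [hy]))]
      rw [colGet_colSet n k _ m hk hm hu]
      show colSet k (jB (updN (colGet k m) i j) i js) _ = colSet k (jB (colGet k m) i (j :: js)) m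
      rw [colSet_colSet k _ _ m (by rw [hu, hm.1]) (by rw [jB_len, hu, hm.1])]
      congr 1
      show jB (updN (colGet k m) i j) i js = jB (colGet k m) i (j :: js)
      conv_rhs => rw [jB]
      rw [if_pos hb]
    · rw [if_neg (by rw [hcond]; exact hb)]
      have : jB (colGet k m) i (j :: js) = colGet k m := by
        rw [jB, if_neg hb]
      rw [this]
      exact (colSet_colGet n k m hk hm).symm

-- ---- branch lemmas ----
theorem LEFT_eq (n : Nat) (m : List (List Int)) (hsq : sqm n m) :
    (PySem.List.pyRange 0 (PySem.List.len m) 1).foldl (fun m k =>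
      (PySem.List.pyRange 0 (PySem.List.len m - 1) 1).foldl (fun m i =>
        (PySem.List.pyRange (i + 1) (PySem.List.len (PySem.List.pyGetD m 0 [])) 1).foldl (fun m j =>
          if aget m k i == aget m k j || aget m k i == 0 then
            aset (aset m k i (aget m k i + aget m k j)) k j 0
          else m) m) m) m = m.map lineCont := by
  have hlen := hsq.1
  have hrows := hsq.2
  rw [PySem.List.len_eq, hlen, PySem.List.pyRange_zero_nat, List.foldl_map]
  have hb : ∀ (m' : List (List Int)) (k : Nat), k < n → sqm n m' →
      (PySem.List.pyRange 0 (PySem.List.len m' - 1) 1).foldl (fun m i =>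
        (PySem.List.pyRange (i + 1) (PySem.List.len (PySem.List.pyGetD m 0 [])) 1).foldl (fun m j =>
          if aget m (k : Int) i == aget m (k : Int) j || aget m (k : Int) i == 0 then
            aset (aset m (k : Int) i (aget m (k : Int) i + aget m (k : Int) j)) (k : Int) j 0
          else m) m) m' = m'.set k (rowLN n (m'.getD k [])) := by
    intro m' k hkn hm'
    have hn1 : (PySem.List.len m' : Int) - 1 = ((n - 1 : Nat) : Int) := by
      rw [PySem.List.len_eq, hm'.1]; omega
    rw [hn1, PySem.List.pyRange_zero_nat, List.foldl_map]
    have hbI : ∀ (m'' : List (List Int)) (i : Nat), i ∈ List.range (n - 1) → sqm n m'' →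
        (PySem.List.pyRange ((i : Int) + 1) (PySem.List.len (PySem.List.pyGetD m'' 0 [])) 1).foldl (fun m j =>
          if aget m (k : Int) (i : Int) == aget m (k : Int) j || aget m (k : Int) (i : Int) == 0 then
            aset (aset m (k : Int) (i : Int) (aget m (k : Int) (i : Int) + aget m (k : Int) j)) (k : Int) j 0
          else m) m''
        = m''.set k ((List.range' (i + 1) (n - 1 - i)).foldl (fun a j => stepN a i j) (m''.getD k [])) := by
      intro m'' i _ hm''
      have hrow0 : (PySem.List.pyGetD m'' 0 ([] : List Int)).length = n := by
        rw [PySem.List.pyGetD_zero, List.getD_eq_getElem m'' [] (by rw [hm''.1]; omega)]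
        exact hm''.2 _ (List.getElem_mem _)
      have hcast : ((i : Int) + 1) = ((i + 1 : Nat) : Int) := by push_cast; ring
      rw [hcast, PySem.List.len_eq, hrow0, castRangeAsc (i + 1) n, List.foldl_map]
      have hnn : n - (i + 1) = n - 1 - i := by omega
      rw [hnn]
      exact set_local_foldl n k (List.range' (i + 1) (n - 1 - i)) (fun r j => stepN r i j)
        (fun m3 j => if aget m3 (k : Int) (i : Int) == aget m3 (k : Int) (j : Int) || aget m3 (k : Int) (i : Int) == 0 then
            aset (aset m3 (k : Int) (i : Int) (aget m3 (k : Int) (i : Int) + aget m3 (k : Int) (j : Int))) (k : Int) (j : Int) 0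
          else m3) hkn
        (fun r j _ hr => by rw [stepN_len]; exact hr)
        (fun m3 j _ hm3 => row_step n k i j m3 hkn hm3) m'' hm''
    have hset := set_local_foldl n k (List.range (n - 1))
      (fun r i => (List.range' (i + 1) (n - 1 - i)).foldl (fun a j => stepN a i j) r)
      (fun m'' i =>
        (PySem.List.pyRange ((i : Int) + 1) (PySem.List.len (PySem.List.pyGetD m'' 0 [])) 1).foldl (fun m j =>
          if aget m (k : Int) (i : Int) == aget m (k : Int) j || aget m (k : Int) (i : Int) == 0 then
            aset (aset m (k : Int) (i : Int) (aget m (k : Int) (i : Int) + aget m (k : Int) j)) (k : Int) j 0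
          else m) m'') hkn
      (fun r i _ hr => by
        rw [foldl_len _ _ (fun a j _ => stepN_len a i j)]; exact hr)
      hbI m' hm'
    exact hset
  have key := foldl_k_rows n (rowLN n)
    (fun mm kk =>
      (PySem.List.pyRange 0 (PySem.List.len mm - 1) 1).foldl (fun m i =>
        (PySem.List.pyRange (i + 1) (PySem.List.len (PySem.List.pyGetD m 0 [])) 1).foldl (fun m j =>
          if aget m (kk : Int) i == aget m (kk : Int) j || aget m (kk : Int) i == 0 then
            aset (aset m (kk : Int) i (aget m (kk : Int) i + aget m (kk : Int) j)) (kk : Int) j 0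
          else m) m) mm)
    (fun r hr => by rw [rowLN_len]; exact hr) hb m [] (by simpa using hrows) (by simpa using hlen)
  simp only [List.nil_append, List.length_nil] at key
  rw [hlen, ← List.range_eq_range'] at key
  have hmc : m.map (rowLN n) = m.map lineCont := by
    apply List.map_congr_left
    intro r hr
    exact rowLN_eq n r (hrows r hr)
  exact key.trans hmc
theorem RIGHT_eq (n : Nat) (m : List (List Int)) (hsq : sqm n m) :
    (PySem.List.pyRange 0 (PySem.List.len m) 1).foldl (fun m k =>
      (PySem.List.pyRange (PySem.List.len m - 1) 0 (-1)).foldl (fun m i =>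
        (PySem.List.pyRange (i - 1) (-1) (-1)).foldl (fun m j =>
          if aget m k i == aget m k j || aget m k i == 0 then
            aset (aset m k i (aget m k i + aget m k j)) k j 0
          else m) m) m) m = m.map (fun r => (lineCont r.reverse).reverse) := by
  have hlen := hsq.1
  have hrows := hsq.2
  rw [PySem.List.len_eq, hlen, PySem.List.pyRange_zero_nat, List.foldl_map]
  have hb : ∀ (m' : List (List Int)) (k : Nat), k < n → sqm n m' →
      (PySem.List.pyRange (PySem.List.len m' - 1) 0 (-1)).foldl (fun m i =>
        (PySem.List.pyRange (i - 1) (-1) (-1)).foldl (fun m j =>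
          if aget m (k : Int) i == aget m (k : Int) j || aget m (k : Int) i == 0 then
            aset (aset m (k : Int) i (aget m (k : Int) i + aget m (k : Int) j)) (k : Int) j 0
          else m) m) m' = m'.set k (rowRN n (m'.getD k [])) := by
    intro m' k hkn hm'
    have hn1 : (PySem.List.len m' : Int) - 1 = ((n : Int)) - 1 := by
      rw [PySem.List.len_eq, hm'.1]
    rw [hn1, descRangeTop n (by omega), List.foldl_map]
    have hbI : ∀ (m'' : List (List Int)) (i : Nat), i ∈ (List.range (n - 1)).map (fun t => n - 1 - t) → sqm n m'' →
        (PySem.List.pyRange ((i : Int) - 1) (-1) (-1)).foldl (fun m j =>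
          if aget m (k : Int) (i : Int) == aget m (k : Int) j || aget m (k : Int) (i : Int) == 0 then
            aset (aset m (k : Int) (i : Int) (aget m (k : Int) (i : Int) + aget m (k : Int) j)) (k : Int) j 0
          else m) m''
        = m''.set k (((List.range i).map (fun t => i - 1 - t)).foldl (fun a j => stepN a i j) (m''.getD k [])) := by
      intro m'' i _ hm''
      rw [descRange i, List.foldl_map]
      exact set_local_foldl n k ((List.range i).map (fun t => i - 1 - t)) (fun r j => stepN r i j)
        (fun m3 j => if aget m3 (k : Int) (i : Int) == aget m3 (k : Int) (j : Int) || aget m3 (k : Int) (i : Int) == 0 then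
            aset (aset m3 (k : Int) (i : Int) (aget m3 (k : Int) (i : Int) + aget m3 (k : Int) (j : Int))) (k : Int) (j : Int) 0
          else m3) hkn
        (fun r j _ hr => by rw [stepN_len]; exact hr)
        (fun m3 j _ hm3 => row_step n k i j m3 hkn hm3) m'' hm''
    have hset := set_local_foldl n k ((List.range (n - 1)).map (fun t => n - 1 - t))
      (fun r i => ((List.range i).map (fun t => i - 1 - t)).foldl (fun a j => stepN a i j) r)
      (fun m'' i =>
        (PySem.List.pyRange ((i : Int) - 1) (-1) (-1)).foldl (fun m j =>
          if aget m (k : Int) (i : Int) == aget m (k : Int) j || aget m (k : Int) (i : Int) == 0 then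
            aset (aset m (k : Int) (i : Int) (aget m (k : Int) (i : Int) + aget m (k : Int) j)) (k : Int) j 0
          else m) m'') hkn
      (fun r i _ hr => by
        rw [foldl_len _ _ (fun a j _ => stepN_len a i j)]; exact hr)
      hbI m' hm'
    exact hset
  have key := foldl_k_rows n (rowRN n)
    (fun mm kk =>
      (PySem.List.pyRange (PySem.List.len mm - 1) 0 (-1)).foldl (fun m i =>
        (PySem.List.pyRange (i - 1) (-1) (-1)).foldl (fun m j =>
          if aget m (kk : Int) i == aget m (kk : Int) j || aget m (kk : Int) i == 0 then
            aset (aset m (kk : Int) i (aget m (kk : Int) i + aget m (kk : Int) j)) (kk : Int) j 0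
          else m) m) mm)
    (fun r hr => by rw [rowRN_len]; exact hr) hb m [] (by simpa using hrows) (by simpa using hlen)
  simp only [List.nil_append, List.length_nil] at key
  rw [hlen, ← List.range_eq_range'] at key
  have hmc : m.map (rowRN n) = m.map (fun r => (lineCont r.reverse).reverse) := by
    apply List.map_congr_left
    intro r hr
    exact rowRN_eq n r (hrows r hr)
  exact key.trans hmc
theorem UP_eq (n : Nat) (m : List (List Int)) (hsq : sqm n m) :
    (PySem.List.pyRange 0 (PySem.List.len m) 1).foldl (fun m k =>
      (PySem.List.pyRange 0 (PySem.List.len m - 1) 1).foldl (fun m i =>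
        ujloop m k i (PySem.List.pyRange (i + 1) (PySem.List.len (PySem.List.pyGetD m 0 [])) 1)) m) m
      = zipT ((zipT m).map lineBreak) := by
  have hlen := hsq.1
  have hrows := hsq.2
  rw [PySem.List.len_eq, hlen, PySem.List.pyRange_zero_nat, List.foldl_map]
  have hcol : ∀ (m' : List (List Int)) (k : Nat), k < n → sqm n m' →
      (PySem.List.pyRange 0 (PySem.List.len m' - 1) 1).foldl (fun m i =>
        ujloop m (k : Int) i (PySem.List.pyRange (i + 1) (PySem.List.len (PySem.List.pyGetD m 0 [])) 1)) m'
      = colSet k (rowBN n (colGet k m')) m' := by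
    intro m' k hkn hm'
    have hn1 : (PySem.List.len m' : Int) - 1 = ((n - 1 : Nat) : Int) := by
      rw [PySem.List.len_eq, hm'.1]; omega
    rw [hn1, PySem.List.pyRange_zero_nat, List.foldl_map]
    have hbI : ∀ (m'' : List (List Int)) (i : Nat), i ∈ List.range (n - 1) → sqm n m'' →
        ujloop m'' (k : Int) (i : Int) (PySem.List.pyRange ((i : Int) + 1) (PySem.List.len (PySem.List.pyGetD m'' 0 [])) 1)
        = colSet k (jB (colGet k m'') i (List.range' (i + 1) (n - 1 - i))) m'' := by
      intro m'' i hi hm''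
      simp only [List.mem_range] at hi
      have hrow0 : (PySem.List.pyGetD m'' 0 ([] : List Int)).length = n := by
        rw [PySem.List.pyGetD_zero, List.getD_eq_getElem m'' [] (by rw [hm''.1]; omega)]
        exact hm''.2 _ (List.getElem_mem _)
      have hcast : ((i : Int) + 1) = ((i + 1 : Nat) : Int) := by push_cast; ring
      rw [hcast, PySem.List.len_eq, hrow0, castRangeAsc (i + 1) n]
      have hnn : n - (i + 1) = n - 1 - i := by omega
      rw [hnn]
      exact ujloop_col n k i (List.range' (i + 1) (n - 1 - i)) hkn (by omega) m'' hm''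
        (fun j hj => by
          rw [List.mem_range'_1] at hj
          omega)
    have hset := colset_local_foldl n k (List.range (n - 1))
      (fun c i => jB c i (List.range' (i + 1) (n - 1 - i)))
      (fun m'' i =>
        ujloop m'' (k : Int) (i : Int) (PySem.List.pyRange ((i : Int) + 1) (PySem.List.len (PySem.List.pyGetD m'' 0 [])) 1)) hkn
      (fun c i _ hc => by rw [jB_len]; exact hc)
      hbI m' hm'
    exact hset
  have hb : ∀ (m' : List (List Int)) (k : Nat), k ∈ List.range n → sqm n m' →
      (PySem.List.pyRange 0 (PySem.List.len m' - 1) 1).foldl (fun m i =>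
        ujloop m (k : Int) i (PySem.List.pyRange (i + 1) (PySem.List.len (PySem.List.pyGetD m 0 [])) 1)) m'
      = zipT ((zipT m').set k (rowBN n ((zipT m').getD k []))) := by
    intro m' k hk hm'
    simp only [List.mem_range] at hk
    rw [hcol m' k hk hm', zipT_getD n k m' hm' hk,
      zipT_set n k (rowBN n (colGet k m')) m' hm' hk (by rw [rowBN_len, colGet_len, hm'.1])]
  have key := foldl_zipT_conj n (List.range n)
    (fun mm kk =>
      (PySem.List.pyRange 0 (PySem.List.len mm - 1) 1).foldl (fun m i =>
        ujloop m (kk : Int) i (PySem.List.pyRange (i + 1) (PySem.List.len (PySem.List.pyGetD m 0 [])) 1)) mm)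
    (fun M kk => M.set kk (rowBN n (M.getD kk [])))
    hb
    (fun M kk hkk hM => by
      constructor
      · simp [hM.1]
      · intro r hr
        rcases List.mem_or_eq_of_mem_set hr with h | h
        · exact hM.2 r h
        · subst h
          rw [rowBN_len]
          rw [List.getD_eq_getElem M [] (by rw [hM.1]; simpa using hkk)]
          exact hM.2 _ (List.getElem_mem _))
    m hsq
  have hz := zipT_sq n m hsq
  have hinner : (List.range n).foldl (fun M kk => M.set kk (rowBN n (M.getD kk []))) (zipT m)
      = (zipT m).map (rowBN n) := by
    have h2 := foldl_k_rows n (rowBN n) (fun M kk => M.set kk (rowBN n (M.getD kk [])))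
      (fun r hr => by rw [rowBN_len]; exact hr)
      (fun M kk _ _ => rfl) (zipT m) [] (by simpa using hz.2) (by simpa using hz.1)
    simp only [List.nil_append, List.length_nil] at h2
    rw [hz.1, ← List.range_eq_range'] at h2
    exact h2
  rw [key, hinner]
  have hmc : (zipT m).map (rowBN n) = (zipT m).map lineBreak := by
    apply List.map_congr_left
    intro c hc
    exact rowBN_eq n c (hz.2 c hc)
  rw [hmc]
theorem DOWN_eq (n : Nat) (m : List (List Int)) (hsq : sqm n m) :
    (PySem.List.pyRange 0 (PySem.List.len m) 1).foldl (fun m k =>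
      (PySem.List.pyRange (PySem.List.len m - 1) 0 (-1)).foldl (fun m i =>
        ujloop m k i (PySem.List.pyRange (i - 1) (-1) (-1))) m) m
      = zipT ((zipT m).map (fun c => (lineBreak c.reverse).reverse)) := by
  have hlen := hsq.1
  have hrows := hsq.2
  rw [PySem.List.len_eq, hlen, PySem.List.pyRange_zero_nat, List.foldl_map]
  have hcol : ∀ (m' : List (List Int)) (k : Nat), k < n → sqm n m' →
      (PySem.List.pyRange (PySem.List.len m' - 1) 0 (-1)).foldl (fun m i =>
        ujloop m (k : Int) i (PySem.List.pyRange (i - 1) (-1) (-1))) m'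
      = colSet k (rowBDN n (colGet k m')) m' := by
    intro m' k hkn hm'
    have hn1 : (PySem.List.len m' : Int) - 1 = ((n : Int)) - 1 := by
      rw [PySem.List.len_eq, hm'.1]
    rw [hn1, descRangeTop n (by omega), List.foldl_map]
    have hbI : ∀ (m'' : List (List Int)) (i : Nat), i ∈ (List.range (n - 1)).map (fun t => n - 1 - t) → sqm n m'' →
        ujloop m'' (k : Int) (i : Int) (PySem.List.pyRange ((i : Int) - 1) (-1) (-1))
        = colSet k (jB (colGet k m'') i ((List.range i).map (fun t => i - 1 - t))) m'' := by
      intro m'' i hi hm''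
      have hi' : i < n := by
        simp only [List.mem_map, List.mem_range] at hi
        obtain ⟨t, ht, rfl⟩ := hi
        omega
      rw [descRange i]
      exact ujloop_col n k i ((List.range i).map (fun t => i - 1 - t)) hkn hi' m'' hm''
        (fun j hj => by
          simp only [List.mem_map, List.mem_range] at hj
          obtain ⟨t, ht, rfl⟩ := hj
          omega)
    have hset := colset_local_foldl n k ((List.range (n - 1)).map (fun t => n - 1 - t))
      (fun c i => jB c i ((List.range i).map (fun t => i - 1 - t)))
      (fun m'' i =>
        ujloop m'' (k : Int) (i : Int) (PySem.List.pyRange ((i : Int) - 1) (-1) (-1))) hkn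
      (fun c i _ hc => by rw [jB_len]; exact hc)
      hbI m' hm'
    exact hset
  have hb : ∀ (m' : List (List Int)) (k : Nat), k ∈ List.range n → sqm n m' →
      (PySem.List.pyRange (PySem.List.len m' - 1) 0 (-1)).foldl (fun m i =>
        ujloop m (k : Int) i (PySem.List.pyRange (i - 1) (-1) (-1))) m'
      = zipT ((zipT m').set k (rowBDN n ((zipT m').getD k []))) := by
    intro m' k hk hm'
    simp only [List.mem_range] at hk
    rw [hcol m' k hk hm', zipT_getD n k m' hm' hk,
      zipT_set n k (rowBDN n (colGet k m')) m' hm' hk (by rw [rowBDN_len, colGet_len, hm'.1])]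
  have key := foldl_zipT_conj n (List.range n)
    (fun mm kk =>
      (PySem.List.pyRange (PySem.List.len mm - 1) 0 (-1)).foldl (fun m i =>
        ujloop m (kk : Int) i (PySem.List.pyRange (i - 1) (-1) (-1))) mm)
    (fun M kk => M.set kk (rowBDN n (M.getD kk [])))
    hb
    (fun M kk hkk hM => by
      constructor
      · simp [hM.1]
      · intro r hr
        rcases List.mem_or_eq_of_mem_set hr with h | h
        · exact hM.2 r h
        · subst h
          rw [rowBDN_len]
          rw [List.getD_eq_getElem M [] (by rw [hM.1]; simpa using hkk)]
          exact hM.2 _ (List.getElem_mem _))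
    m hsq
  have hz := zipT_sq n m hsq
  have hinner : (List.range n).foldl (fun M kk => M.set kk (rowBDN n (M.getD kk []))) (zipT m)
      = (zipT m).map (rowBDN n) := by
    have h2 := foldl_k_rows n (rowBDN n) (fun M kk => M.set kk (rowBDN n (M.getD kk [])))
      (fun r hr => by rw [rowBDN_len]; exact hr)
      (fun M kk _ _ => rfl) (zipT m) [] (by simpa using hz.2) (by simpa using hz.1)
    simp only [List.nil_append, List.length_nil] at h2
    rw [hz.1, ← List.range_eq_range'] at h2
    exact h2
  rw [key, hinner]
  have hmc : (zipT m).map (rowBDN n) = (zipT m).map (fun c => (lineBreak c.reverse).reverse) := by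
    apply List.map_congr_left
    intro c hc
    exact rowBDN_eq n c (hz.2 c hc)
  rw [hmc]

-- ===== VERDICT (by name: the statement is the Claim_ definition above) =====
theorem get_swiped_game_map_spec : Claim_equal_get_swiped_game_map := by
  intro gm swipe _ hpre
  unfold Spec_get_swiped_game_map get_swiped_game_map get_swiped_game_map_alt
  have hsq : sqm gm.length gm := ⟨rfl, hpre⟩
  by_cases h1 : swipe == "LEFT"
  · simp only [h1, if_true]; exact LEFT_eq gm.length gm hsq
  · simp only [h1, if_false]
    by_cases h2 : swipe == "RIGHT"
    · simp only [h2, if_true]; exact RIGHT_eq gm.length gm hsq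
    · simp only [h2, if_false]
      by_cases h3 : swipe == "UP"
      · simp only [h3, if_true]; exact UP_eq gm.length gm hsq
      · simp only [h3, if_false]; exact DOWN_eq gm.length gm hsq
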